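-- pv_equiv track=rewrite | github.com/sxgmytt/intro_speech_understanding | 2023_fall/lec03/homework3.py | cancellation
-- ===== SOURCE A (Python) =====
-- def cancellation(list, stop_word):
--     output_list = []
--     for x in list:
--         if x == stop_word:
--             break
--         output_list.append(x)
--     return output_list
--
--
--     pass
-- ===== SOURCE B (Python) =====
-- def cancellation(list, stop_word):
--     try:
--         idx = list.index(stop_word)
--     except ValueError:
--         return list[:]
--     return list[:idx]
-- ===== Notes on version B (the rewrite author's own statement) =====
-- stated objective: idiomatic
-- what changed: Replaces the accumulator loop with break by locating the stop word's first position via list.index (try/except for the absent case) and returning a single slice.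
import Mathlib
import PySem

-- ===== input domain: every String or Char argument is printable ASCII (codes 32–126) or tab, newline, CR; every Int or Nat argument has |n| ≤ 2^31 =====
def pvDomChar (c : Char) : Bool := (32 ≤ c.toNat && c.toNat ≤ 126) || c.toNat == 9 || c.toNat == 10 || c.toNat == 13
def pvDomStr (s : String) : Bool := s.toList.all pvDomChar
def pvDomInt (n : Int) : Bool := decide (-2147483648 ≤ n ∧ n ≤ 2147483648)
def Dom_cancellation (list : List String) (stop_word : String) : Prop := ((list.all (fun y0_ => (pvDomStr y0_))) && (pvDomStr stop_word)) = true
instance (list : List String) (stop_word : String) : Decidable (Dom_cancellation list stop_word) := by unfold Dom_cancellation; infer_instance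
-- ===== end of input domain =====

-- B replaces A's break-on-match accumulator loop with list.index + a single slice (idiomatic; same cost).


-- ===== PORT A =====
-- loop with break: structural recursion over the list with an accumulator
def cancellationLoop (stop_word : String) (acc : List String) : List String → List String
  | [] => acc
  | x :: xs => if x = stop_word then acc else cancellationLoop stop_word (acc ++ [x]) xs

def cancellation (list : List String) (stop_word : String) : List String :=
  cancellationLoop stop_word [] list

-- ===== PORT B =====
-- B: find the stop word's first index (try/except list.index), return one slice
def cancellation_alt (list : List String) (stop_word : String) : List String :=
  match PySem.List.index? list stop_word with
  | none => list
  | some idx => PySem.List.slice list none (some (idx : Int))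

-- ===== PRECONDITION & SPEC =====
def Spec_cancellation (list : List String) (stop_word : String) (out : List String) : Prop := out = cancellation_alt list stop_word
instance (list : List String) (stop_word : String) (out : List String) : Decidable (Spec_cancellation list stop_word out) := by unfold Spec_cancellation; infer_instance

-- ===== CLAIM (what is proved, stated in full; the proofs are below) =====
def Claim_equal_cancellation : Prop := ∀ (list : List String) (stop_word : String), Dom_cancellation list stop_word → Spec_cancellation list stop_word (cancellation list stop_word)

-- ===== LEMMAS AND PROOFS =====

-- ===== VERDICT (by name: the statement is the Claim_ definition above) =====
lemma alt_nil (s : String) : cancellation_alt [] s = [] := by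
  simp [cancellation_alt, PySem.List.index?]

lemma alt_cons (x : String) (xs : List String) (s : String) :
    cancellation_alt (x :: xs) s =
      if x = s then [] else x :: cancellation_alt xs s := by
  simp only [cancellation_alt]
  by_cases h : x = s
  · subst h
    rw [PySem.List.index?_cons_self, if_pos rfl]
    show PySem.List.slice (x :: xs) none (some ((0 : Nat) : Int)) = []
    rw [PySem.List.slice_to_natCast]
    simp
  · rw [PySem.List.index?_cons_of_ne xs h, if_neg h]
    cases PySem.List.index? xs s with
    | none => rfl
    | some k =>
        show PySem.List.slice (x :: xs) none (some ((k + 1 : Nat) : Int)) =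
          x :: PySem.List.slice xs none (some ((k : Nat) : Int))
        rw [PySem.List.slice_to_natCast, PySem.List.slice_to_natCast]
        simp

lemma loop_eq (s : String) (l acc : List String) :
    cancellationLoop s acc l = acc ++ cancellation_alt l s := by
  induction l generalizing acc with
  | nil => simp [cancellationLoop, alt_nil]
  | cons x xs ih =>
      rw [cancellationLoop, alt_cons]
      by_cases h : x = s <;> simp [h, ih]

theorem cancellation_spec : Claim_equal_cancellation := by
  intro l s _
  unfold Spec_cancellation cancellation
  rw [loop_eq]
  simp
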